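-- pv_equiv track=rewrite | github.com/aidigii/Uber-Career-Prep-Homework-Aliah-DeGuzman | Assignment-1/a1part2.py | isStringPermutation
-- ===== SOURCE A (Python) =====
-- def isStringPermutation(s1:str, s2:str) -> bool:
--
--     # no need to check further if this is not true
--     if len(s1) != len(s2):
--         return False
--
--     map = {}
--
--     # put all frequencies of letter in map
--     for i in s2:
--         if i in map:
--             map[i] += 1
--         else:
--             map[i] = 1
--
--     # check if s1 is a permutation
--     for i in s1:
--         if i in map:
--             # decrements a letter every time we see it in s1
--             map[i] -= 1
--             if map[i] == 0:
--                 # if there are no more of that occurrence just remove it from map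
--                 del map[i]
--         else:
--             return False
--     # if all letters are accounted for, it's a permutation
--     if len(map) == 0:
--         return True
--     return False
-- ===== SOURCE B (Python) =====
-- def isStringPermutation(s1: str, s2: str) -> bool:
--     # sort-and-compare: equal sorted character lists <=> same multiset of characters
--     return sorted(s1) == sorted(s2)
-- ===== Notes on version B (the rewrite author's own statement) =====
-- stated objective: idiomatic
-- what changed: Replaces the frequency-map build-and-decrement (with early returns and key deletion) by sorting both strings and comparing the sorted character lists; the length guard disappears.
import Mathlib
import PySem

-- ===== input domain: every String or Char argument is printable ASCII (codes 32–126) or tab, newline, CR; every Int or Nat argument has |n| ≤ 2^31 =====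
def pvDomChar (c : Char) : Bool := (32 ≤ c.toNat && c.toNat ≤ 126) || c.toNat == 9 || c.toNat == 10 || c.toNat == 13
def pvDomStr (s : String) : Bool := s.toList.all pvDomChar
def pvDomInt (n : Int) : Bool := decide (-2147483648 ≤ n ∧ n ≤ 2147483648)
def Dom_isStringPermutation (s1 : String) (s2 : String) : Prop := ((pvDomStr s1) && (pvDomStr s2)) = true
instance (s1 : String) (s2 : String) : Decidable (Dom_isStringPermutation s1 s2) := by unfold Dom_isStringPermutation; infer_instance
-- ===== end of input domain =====

-- B replaces A's frequency-map build-and-decrement by sorting both strings and comparing (idiomatic; not faster).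

-- ===== PORT A =====
-- first loop of A: put all frequencies of letters of s2 in map
def pvBuild (l : List Char) : PySem.Dict Char Int :=
  l.foldl (fun map i =>
    if map.contains i then map.insert i (map.getD i 0 + 1) else map.insert i 1)
    PySem.Dict.empty

-- second loop of A (early 'return False' = the 'else false' branch), followed by the final len(map)==0 check
def pvCheck : List Char → PySem.Dict Char Int → Bool
  | [], map => map.size == 0
  | i :: rest, map =>
    if map.contains i then
      let m1 := map.insert i (map.getD i 0 - 1)
      if m1.getD i 0 == 0 then pvCheck rest (m1.erase i)
      else pvCheck rest m1
    else false

def isStringPermutation (s1 : String) (s2 : String) : Bool :=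
  if PySem.Str.len s1 ≠ PySem.Str.len s2 then false
  else pvCheck s1.toList (pvBuild s2.toList)

-- ===== PORT B =====
def isStringPermutation_alt (s1 : String) (s2 : String) : Bool :=
  PySem.List.sorted s1.toList (fun x => x) false == PySem.List.sorted s2.toList (fun x => x) false

-- ===== PRECONDITION & SPEC =====
def Spec_isStringPermutation (s1 : String) (s2 : String) (out : Bool) : Prop := out = isStringPermutation_alt s1 s2
instance (s1 : String) (s2 : String) (out : Bool) : Decidable (Spec_isStringPermutation s1 s2 out) := by unfold Spec_isStringPermutation; infer_instance

-- ===== CLAIM (what is proved, stated in full; the proofs are below) =====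
def Claim_equal_isStringPermutation : Prop := ∀ (s1 : String) (s2 : String), Dom_isStringPermutation s1 s2 → Spec_isStringPermutation s1 s2 (isStringPermutation s1 s2)

-- ===== LEMMAS AND PROOFS =====

-- A's first loop builds Counter(s2) (the 'else' branch inserts 1 = getD+1 when the key is absent)
theorem pvBuild_eq_counter (l : List Char) : pvBuild l = PySem.Dict.counter l := by
  have hf : (fun (map : PySem.Dict Char Int) i =>
      if map.contains i then map.insert i (map.getD i 0 + 1) else map.insert i 1)
      = (fun map i => map.insert i (map.getD i 0 + 1)) := by
    funext map i
    by_cases h : map.contains i = true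
    · simp [h]
    · simp only [Bool.not_eq_true] at h
      simp [h, PySem.Dict.getD_of_not_contains map 0 h]
  unfold pvBuild
  rw [hf, PySem.Dict.foldl_insert_getD_add_one_eq_counter]

-- Dict.erase lemmas (not in the prelude): lookup and membership after erase
theorem pvFind?_filter_ne (t : List (Char × Int)) (k k' : Char) :
    (t.filter (fun p => !p.1 == k)).find? (fun p => p.1 == k')
      = if k' = k then none else t.find? (fun p => p.1 == k') := by
  induction t with
  | nil => split <;> rfl
  | cons p t ih =>
    by_cases hpk : p.1 = k <;> by_cases hpk' : p.1 = k' <;> by_cases hkk : k' = k <;>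
      simp_all

theorem pvGet?_erase (d : PySem.Dict Char Int) (k k' : Char) :
    (d.erase k).get? k' = if k' = k then none else d.get? k' := by
  obtain ⟨items⟩ := d
  simp only [PySem.Dict.erase, PySem.Dict.get?, pvFind?_filter_ne]
  split <;> rfl

theorem pvGetD_erase (d : PySem.Dict Char Int) (k k' : Char) (d0 : Int) :
    (d.erase k).getD k' d0 = if k' = k then d0 else d.getD k' d0 := by
  rw [PySem.Dict.getD_eq_get?_getD, pvGet?_erase, PySem.Dict.getD_eq_get?_getD]
  split <;> rfl

theorem pvContains_erase (d : PySem.Dict Char Int) (k k' : Char) :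
    (d.erase k).contains k' = if k' = k then false else d.contains k' := by
  rw [PySem.Dict.contains_eq_isSome_get?, pvGet?_erase, PySem.Dict.contains_eq_isSome_get?]
  split <;> rfl

-- the loop invariant: d behaves as the counter of the (multiset of the) list r, with no zero-count keys
def pvInv (d : PySem.Dict Char Int) (r : List Char) : Prop :=
  ∀ c, d.getD c 0 = (r.count c : Int) ∧ d.contains c = decide (c ∈ r)

theorem pvInv_counter (r : List Char) : pvInv (PySem.Dict.counter r) r := by
  intro c
  refine ⟨PySem.Dict.getD_counter r c, ?_⟩
  rw [PySem.Dict.contains_counter]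
  simp

theorem pvSize_zero_of_inv {d : PySem.Dict Char Int} (h : pvInv d []) : d.size = 0 := by
  obtain ⟨items⟩ := d
  cases items with
  | nil => rfl
  | cons p t =>
    have := (h p.1).2
    simp [PySem.Dict.contains] at this

theorem pvCheck_eq_perm (l : List Char) : ∀ (r : List Char) (d : PySem.Dict Char Int),
    pvInv d r → pvCheck l d = decide (l.Perm r) := by
  induction l with
  | nil =>
    intro r d h
    cases r with
    | nil => simp [pvCheck, pvSize_zero_of_inv h]
    | cons x t =>
      have hx := (h x).2
      simp only [List.mem_cons, true_or, decide_true] at hx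
      have hne : d.size ≠ 0 := by
        intro hs
        obtain ⟨items⟩ := d
        cases items with
        | nil => simp [PySem.Dict.contains] at hx
        | cons p u => simp [PySem.Dict.size] at hs
      simp [pvCheck, hne]
  | cons i rest ih =>
    intro r d h
    by_cases hmem : i ∈ r
    · have hc : d.contains i = true := by rw [(h i).2]; simpa using hmem
      have hcount : 0 < r.count i := List.count_pos_iff.mpr hmem
      have hgd : d.getD i 0 = (r.count i : Int) := (h i).1
      simp only [pvCheck, hc, if_true]
      rw [PySem.Dict.getD_insert, if_pos rfl, hgd]
      by_cases h1 : r.count i = 1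
      · have : ((r.count i : Int) - 1 == 0) = true := by simp [h1]
        simp only [this]
        rw [if_pos trivial]
        have hinv : pvInv ((d.insert i ((r.count i : Int) - 1)).erase i) (r.erase i) := by
          intro c
          by_cases hci : c = i
          · subst hci
            constructor
            · rw [pvGetD_erase]
              simp [List.count_erase_self, h1]
            · rw [pvContains_erase, if_pos rfl]
              have hz : (r.erase c).count c = 0 := by
                rw [List.count_erase_self]; omega
              simp [List.count_eq_zero.mp hz]
          · constructor
            · rw [pvGetD_erase, if_neg hci, PySem.Dict.getD_insert, if_neg hci, (h c).1,
                List.count_erase_of_ne hci]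
            · rw [pvContains_erase, if_neg hci, PySem.Dict.contains_insert, (h c).2]
              simp [hci, List.mem_erase_of_ne hci]
        rw [ih _ _ hinv]
        have : (i :: rest).Perm r ↔ rest.Perm (r.erase i) := by
          rw [List.cons_perm_iff_perm_erase]
          simp [hmem]
        simp [this]
      · have hne : ((r.count i : Int) - 1 == 0) = false := by
          simp; omega
        simp only [hne]
        rw [if_neg (by simp)]
        have hinv : pvInv (d.insert i ((r.count i : Int) - 1)) (r.erase i) := by
          intro c
          by_cases hci : c = i
          · subst hci
            constructor
            · rw [PySem.Dict.getD_insert, if_pos rfl]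
              rw [List.count_erase_self]
              omega
            · rw [PySem.Dict.contains_insert]
              have : c ∈ r.erase c := by
                rw [← List.count_pos_iff, List.count_erase_self]
                omega
              simp [this]
          · constructor
            · rw [PySem.Dict.getD_insert, if_neg hci, (h c).1, List.count_erase_of_ne hci]
            · rw [PySem.Dict.contains_insert, (h c).2]
              simp [hci, List.mem_erase_of_ne hci]
        rw [ih _ _ hinv]
        have : (i :: rest).Perm r ↔ rest.Perm (r.erase i) := by
          rw [List.cons_perm_iff_perm_erase]
          simp [hmem]
        simp [this]
    · have hc : d.contains i = false := by rw [(h i).2]; simpa using hmem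
      simp only [pvCheck, hc, Bool.false_eq_true, if_false]
      have : ¬ (i :: rest).Perm r := fun hp => hmem (hp.mem_iff.mp (by simp))
      simp [this]

theorem alt_eq_perm (s1 s2 : String) :
    isStringPermutation_alt s1 s2 = decide (s1.toList.Perm s2.toList) := by
  unfold isStringPermutation_alt
  rw [Bool.eq_iff_iff]
  simp only [beq_iff_eq, decide_eq_true_eq]
  exact PySem.List.sorted_id_eq_sorted_id_iff_perm _ _

-- ===== VERDICT (by name: the statement is the Claim_ definition above) =====
theorem isStringPermutation_spec : Claim_equal_isStringPermutation := by
  intro s1 s2 _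
  unfold Spec_isStringPermutation
  rw [alt_eq_perm]
  unfold isStringPermutation
  by_cases hlen : PySem.Str.len s1 = PySem.Str.len s2
  · rw [if_neg (by simpa using hlen), pvBuild_eq_counter,
      pvCheck_eq_perm _ _ _ (pvInv_counter s2.toList)]
  · rw [if_pos (by simpa using hlen)]
    have : ¬ s1.toList.Perm s2.toList := by
      intro hp
      apply hlen
      simp [PySem.Str.len_eq, hp.length_eq]
    simp [this]
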